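-- pv_equiv track=rewrite | github.com/nstprtko/prg-basics | 04-Functions/04-exercises.py/door.py | f
-- ===== SOURCE A (Python) =====
-- def f(detector):
--     count = 0#initiate count
--     max_count = 0
--
--     for entry in detector:# for each varuable entry in line detector
--         if entry == '+': # check if entry = +
--             count +=1# if so, add +
--
--         elif entry == '-': # check if entry = -
--             count -=1 # if so substract one
--
--     if count >= 3: # after each checking add or substract 1 from the count
--         # if we  have three people in one room or 3 pluses in a room in a row or in the same time
--         return True # return True if so
--     else :
--         return False
-- ===== SOURCE B (Python) =====
-- def f(detector):
--     # cancellation stack: opposite signs annihilate, like bracket matching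
--     stack = []
--     for entry in detector:
--         if entry == '+':
--             if stack and stack[-1] == '-':
--                 stack.pop()
--             else:
--                 stack.append('+')
--         elif entry == '-':
--             if stack and stack[-1] == '+':
--                 stack.pop()
--             else:
--                 stack.append('-')
--     return len(stack) >= 3 and stack[-1] == '+'
-- ===== Notes on version B (the rewrite author's own statement) =====
-- stated objective: alternative
-- what changed: Replaces A's signed integer accumulator with a cancellation stack (bracket-matching style): opposite signs annihilate on top of the stack, leaving a homogeneous stack whose length and top sign decide the answer.
import Mathlib
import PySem

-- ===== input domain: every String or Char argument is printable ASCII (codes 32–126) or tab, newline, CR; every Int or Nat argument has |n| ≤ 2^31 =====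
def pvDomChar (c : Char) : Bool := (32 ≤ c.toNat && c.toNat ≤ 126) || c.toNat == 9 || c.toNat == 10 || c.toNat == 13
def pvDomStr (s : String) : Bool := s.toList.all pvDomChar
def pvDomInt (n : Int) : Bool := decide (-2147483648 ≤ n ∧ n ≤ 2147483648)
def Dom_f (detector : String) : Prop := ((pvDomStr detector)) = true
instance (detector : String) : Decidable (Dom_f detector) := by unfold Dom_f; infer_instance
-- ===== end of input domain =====

-- B differs: instead of A's signed integer accumulator, B keeps a cancellation stack
-- (opposite signs annihilate on top, bracket-matching style) and reads the answer off
-- the stack's length and top sign (objective: alternative algorithm/data structure).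

-- ===== PORT A =====
-- literal transliteration of A: one accumulating pass, per-character if/elif
def f (detector : String) : Bool :=
  let count : Int :=
    detector.toList.foldl
      (fun count entry =>
        if entry = '+' then count + 1
        else if entry = '-' then count - 1
        else count) 0
  if count ≥ 3 then true else false

-- ===== PORT B =====
-- one step of B's loop body; the stack top (Python stack[-1]) is the list head here
def fAltStep (stack : List Char) (entry : Char) : List Char :=
  if entry = '+' then
    if stack ≠ [] ∧ stack.head? = some '-' then stack.tail
    else '+' :: stack
  else if entry = '-' then
    if stack ≠ [] ∧ stack.head? = some '+' then stack.tail
    else '-' :: stack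
  else stack

-- literal transliteration of B: build the cancellation stack, then check length and top
def f_alt (detector : String) : Bool :=
  let stack := detector.toList.foldl fAltStep []
  decide (stack.length ≥ 3) && (stack.head? == some '+')

-- ===== PRECONDITION & SPEC =====
def Spec_f (detector : String) (out : Bool) : Prop := out = f_alt detector
instance (detector : String) (out : Bool) : Decidable (Spec_f detector out) := by unfold Spec_f; infer_instance

-- ===== CLAIM (what is proved, stated in full; the proofs are below) =====
def Claim_equal_f : Prop := ∀ (detector : String), Dom_f detector → Spec_f detector (f detector)

-- ===== LEMMAS AND PROOFS =====

-- the canonical homogeneous stack of balance k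
def canonStack (k : Int) : List Char :=
  if 0 ≤ k then List.replicate k.toNat '+' else List.replicate (-k).toNat '-'

theorem canon_nonneg (k : Int) (h : 0 ≤ k) : canonStack k = List.replicate k.toNat '+' := if_pos h

theorem canon_neg (k : Int) (h : ¬ 0 ≤ k) : canonStack k = List.replicate (-k).toNat '-' := if_neg h

theorem fAltStep_canon (k : Int) (c : Char) :
    fAltStep (canonStack k) c
      = canonStack (k + (if c = '+' then 1 else if c = '-' then -1 else 0)) := by
  by_cases h1 : c = '+'
  · subst h1
    rw [if_pos rfl]
    simp only [fAltStep, if_pos trivial]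
    by_cases hk : 0 ≤ k
    · rw [canon_nonneg k hk, canon_nonneg (k + 1) (by omega)]
      have hno : ¬ (List.replicate k.toNat '+' ≠ [] ∧
          (List.replicate k.toNat '+').head? = some '-') := by
        rintro ⟨hne, hh⟩
        rw [List.head?_replicate] at hh
        by_cases h0 : k.toNat = 0
        · simp [h0] at hne
        · rw [if_neg h0] at hh
          exact absurd (Option.some.inj hh) (by decide)
      rw [if_neg hno, show (k + 1).toNat = k.toNat + 1 by omega, List.replicate_succ]
    · rw [canon_neg k hk]
      obtain ⟨m, hm⟩ : ∃ m, (-k).toNat = m + 1 := ⟨(-k).toNat - 1, by omega⟩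
      rw [hm, List.replicate_succ, if_pos (by simp), List.tail_cons]
      by_cases hk1 : 0 ≤ k + 1
      · rw [canon_nonneg _ hk1, show m = 0 by omega, show (k + 1).toNat = 0 by omega,
          List.replicate_zero, List.replicate_zero]
      · rw [canon_neg _ hk1, show (-(k + 1)).toNat = m by omega]
  · by_cases h2 : c = '-'
    · subst h2
      rw [if_neg (by decide), if_pos rfl]
      simp only [fAltStep]
      rw [if_neg (by decide), if_pos trivial]
      by_cases hk : 0 ≤ k
      · rw [canon_nonneg k hk]
        rcases Nat.eq_zero_or_pos k.toNat with h0 | hpos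
        · rw [h0, if_neg (by simp), canon_neg _ (by omega),
            show (-(k + -1)).toNat = 1 by omega]
          rfl
        · obtain ⟨m, hm⟩ : ∃ m, k.toNat = m + 1 := ⟨k.toNat - 1, by omega⟩
          rw [hm, List.replicate_succ, if_pos (by simp), List.tail_cons,
            canon_nonneg _ (by omega), show (k + -1).toNat = m by omega]
      · rw [canon_neg k hk]
        have hno : ¬ (List.replicate (-k).toNat '-' ≠ [] ∧
            (List.replicate (-k).toNat '-').head? = some '+') := by
          rintro ⟨hne, hh⟩
          rw [List.head?_replicate, if_neg (show (-k).toNat ≠ 0 by omega)] at hh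
          exact absurd (Option.some.inj hh) (by decide)
        rw [if_neg hno, canon_neg _ (by omega),
          show (-(k + -1)).toNat = (-k).toNat + 1 by omega, List.replicate_succ]
    · rw [if_neg h1, if_neg h2]
      simp [fAltStep, h1, h2]

theorem foldl_fAltStep_canon (l : List Char) (k : Int) :
    l.foldl fAltStep (canonStack k)
      = canonStack (l.foldl (fun count entry =>
          if entry = '+' then count + 1
          else if entry = '-' then count - 1
          else count) k) := by
  induction l generalizing k with
  | nil => rfl
  | cons c t ih =>
    simp only [List.foldl_cons, fAltStep_canon]
    rw [ih]
    congr 1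
    by_cases h1 : c = '+' <;> by_cases h2 : c = '-' <;> simp [h1, h2] <;> ring_nf

theorem canonStack_read (k : Int) :
    (decide ((canonStack k).length ≥ 3) && ((canonStack k).head? == some '+'))
      = (if k ≥ 3 then true else false) := by
  unfold canonStack
  by_cases hk : 0 ≤ k
  · rcases Nat.eq_zero_or_pos k.toNat with h0 | hpos
    · simp [hk, h0, show ¬ k ≥ 3 by omega]
    · obtain ⟨m, hm⟩ : ∃ m, k.toNat = m + 1 := ⟨k.toNat - 1, by omega⟩
      by_cases h3 : k ≥ 3 <;> simp [hk, hm, h3, List.replicate_succ] <;> omega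
  · have hpos : 0 < (-k).toNat := by omega
    obtain ⟨m, hm⟩ : ∃ m, (-k).toNat = m + 1 := ⟨(-k).toNat - 1, by omega⟩
    simp [hk, hm, List.replicate_succ, show ¬ k ≥ 3 by omega]

-- ===== VERDICT (by name: the statement is the Claim_ definition above) =====
theorem f_spec : Claim_equal_f := by
  intro detector _
  unfold Spec_f f f_alt
  have h0 : ([] : List Char) = canonStack 0 := by simp [canonStack]
  rw [h0, foldl_fAltStep_canon, canonStack_read]
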